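-- pv_equiv track=rewrite | github.com/richardodliu/OpenDevTool | leetcode/utils.py | calculate_dependency_depth
-- ===== SOURCE A (Python) =====
-- from typing import Dict, Generator, List, Optional, Set, Tuple, Iterable
-- from typing import Dict, Generator, List, Optional, Set, Tuple
-- from typing import List, Dict, Any, Optional
--
-- def calculate_dependency_depth(function_deps: Dict[str, Set[str]]) -> Dict[str, int]:
--     depth = {}
--     visited = set()
--
--     def dfs(func):
--         if func in visited:
--             return depth.get(func, 0)
--         visited.add(func)
--         if func not in function_deps:
--             depth[func] = 0
--             return 0
--         max_depth = 0
--         for dep in function_deps[func]: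
--             max_depth = max(max_depth, dfs(dep) + 1)
--         depth[func] = max_depth
--         return max_depth
--
--     for func in function_deps:
--         if func not in visited:
--             dfs(func)
--
--     return depth
-- ===== SOURCE B (Python) =====
-- def calculate_dependency_depth(function_deps):
--     depth = {}
--     visited = set()
--     for start in function_deps:
--         if start in visited:
--             continue
--         visited.add(start)
--         stack = [[start, list(function_deps.get(start, ())), 0]]
--         while stack:
--             frame = stack[-1]
--             if frame[1]:
--                 dep = frame[1].pop(0)
--                 if dep in visited:
--                     frame[2] = max(frame[2], depth.get(dep, 0) + 1)
--                 else:
--                     visited.add(dep)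
--                     stack.append([dep, list(function_deps.get(dep, ())), 0])
--             else:
--                 stack.pop()
--                 depth[frame[0]] = frame[2]
--                 if stack:
--                     stack[-1][2] = max(stack[-1][2], frame[2] + 1)
--     return depth
-- ===== Notes on version B (the rewrite author's own statement) =====
-- stated objective: alternative
-- what changed: The recursive DFS (nested dfs function with recursion-limited call depth) is replaced by an iterative DFS over an explicit stack of frames (node, remaining deps, running max), with visited marked at push time and already-visited deps folded via depth.get at edge time, so the traversal order and cycle timing are identical.
import Mathlib
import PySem

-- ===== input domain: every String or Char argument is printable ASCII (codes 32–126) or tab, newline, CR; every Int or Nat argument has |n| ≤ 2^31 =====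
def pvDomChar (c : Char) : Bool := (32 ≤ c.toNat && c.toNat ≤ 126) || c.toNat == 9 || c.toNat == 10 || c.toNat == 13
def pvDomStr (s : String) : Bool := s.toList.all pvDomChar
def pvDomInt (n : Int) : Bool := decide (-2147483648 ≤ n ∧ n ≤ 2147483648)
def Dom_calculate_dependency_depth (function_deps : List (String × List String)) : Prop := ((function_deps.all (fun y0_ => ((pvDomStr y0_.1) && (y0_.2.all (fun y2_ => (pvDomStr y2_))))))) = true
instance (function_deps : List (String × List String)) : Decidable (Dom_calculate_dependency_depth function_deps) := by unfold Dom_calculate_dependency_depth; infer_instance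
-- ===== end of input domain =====

-- B replaces A's recursive DFS by an iterative DFS over an explicit stack of frames
-- (node, remaining deps, running max), same visited/depth timing; equal return value
-- (the dependency sets are given as their distinct elements in list order, per the type convention).

abbrev PvSt : Type := PySem.Dict String Int × PySem.Set String

-- all names occurring in the input; used only to size the recursion gas of both ports
def pvUniv (fd : List (String × List String)) : List String :=
  fd.flatMap (fun p => p.1 :: p.2)

-- gas: strictly more than the number of names; the DFS visits each unvisited name once,
-- so neither port ever exhausts it (the 0-gas branches are unreachable)
def pvGas (fd : List (String × List String)) : Nat := (pvUniv fd).length + 1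

-- ===== PORT A =====
mutual
def pvDfsA (fd : List (String × List String)) : Nat → String → PvSt → Int × PvSt
  | 0, _, st => (0, st)
  | f+1, func, st =>
    if PySem.Set.contains st.2 func then (PySem.Dict.getD st.1 func 0, st)
    else
      let st1 : PvSt := (st.1, PySem.Set.add st.2 func)
      match (PySem.Dict.mk fd).get? func with
      | none => (0, (PySem.Dict.insert st1.1 func 0, st1.2))
      | some deps =>
        let r := pvDfsAFold fd f deps (0, st1)
        (r.1, (PySem.Dict.insert r.2.1 func r.1, r.2.2))
  termination_by f _ _ => (f, 0)

def pvDfsAFold (fd : List (String × List String)) : Nat → List String → Int × PvSt → Int × PvSt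
  | _, [], acc => acc
  | f, dep :: rest, acc =>
    let r := pvDfsA fd f dep acc.2
    pvDfsAFold fd f rest (max acc.1 (r.1 + 1), r.2)
  termination_by f l _ => (f, l.length + 1)
end

def pvDriveA (fd : List (String × List String)) (gas : Nat) :
    List (String × List String) → PvSt → PvSt
  | [], st => st
  | p :: rest, st =>
    pvDriveA fd gas rest
      (if PySem.Set.contains st.2 p.1 then st else (pvDfsA fd gas p.1 st).2)

def calculate_dependency_depth (function_deps : List (String × List String)) : List (String × Int) :=
  (pvDriveA function_deps (pvGas function_deps) function_deps
    ((PySem.Dict.empty : PySem.Dict String Int), (PySem.Set.empty : PySem.Set String))).1.items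

-- ===== PORT B =====
-- a frame of the explicit DFS stack: (node, remaining deps, running max)
abbrev PvFrame : Type := String × List String × Int

def pvWeight (S : List PvFrame) : Nat := (S.map (fun fr => fr.2.1.length + 1)).sum

def pvRunB (fd : List (String × List String)) : Nat → List PvFrame → PvSt → PvSt
  | _, [], st => st
  | 0, _ :: _, st => st
  | g+1, (node, dep :: deps', mx) :: rest, st =>
    if PySem.Set.contains st.2 dep then
      pvRunB fd (g+1) ((node, deps', max mx (PySem.Dict.getD st.1 dep 0 + 1)) :: rest) st
    else
      pvRunB fd g ((dep, (PySem.Dict.mk fd).getD dep [], 0) :: (node, deps', mx) :: rest)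
        (st.1, PySem.Set.add st.2 dep)
  | _+1, (node, [], mx) :: [], st => (PySem.Dict.insert st.1 node mx, st.2)
  | g+1, (node, [], mx) :: (pn, pd, pm) :: r, st =>
    pvRunB fd (g+1) ((pn, pd, max pm (mx + 1)) :: r) (PySem.Dict.insert st.1 node mx, st.2)
  termination_by gas S _ => (gas, pvWeight S)
  decreasing_by all_goals simp [pvWeight]; omega

def pvDriveB (fd : List (String × List String)) (gas : Nat) :
    List (String × List String) → PvSt → PvSt
  | [], st => st
  | p :: rest, st =>
    pvDriveB fd gas rest
      (if PySem.Set.contains st.2 p.1 then st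
       else pvRunB fd gas [(p.1, (PySem.Dict.mk fd).getD p.1 [], 0)]
              (st.1, PySem.Set.add st.2 p.1))

def calculate_dependency_depth_alt (function_deps : List (String × List String)) : List (String × Int) :=
  (pvDriveB function_deps (pvGas function_deps) function_deps
    ((PySem.Dict.empty : PySem.Dict String Int), (PySem.Set.empty : PySem.Set String))).1.items

-- ===== PRECONDITION & SPEC =====
def Spec_calculate_dependency_depth (function_deps : List (String × List String)) (out : List (String × Int)) : Prop := out = calculate_dependency_depth_alt function_deps
instance (function_deps : List (String × List String)) (out : List (String × Int)) : Decidable (Spec_calculate_dependency_depth function_deps out) := by unfold Spec_calculate_dependency_depth; infer_instance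

-- ===== CLAIM (what is proved, stated in full; the proofs are below) =====
def Claim_equal_calculate_dependency_depth : Prop := ∀ (function_deps : List (String × List String)), Dom_calculate_dependency_depth function_deps → Spec_calculate_dependency_depth function_deps (calculate_dependency_depth function_deps)

-- ===== LEMMAS AND PROOFS =====

-- number of names of the input not yet visited (proof-side measure)
def pvFresh (fd : List (String × List String)) (v : PySem.Set String) : Nat :=
  (pvUniv fd).countP (fun x => !(PySem.Set.contains v x))

-- every dep list held in the stack consists of names of the input
def pvSOK (fd : List (String × List String)) (S : List PvFrame) : Prop :=
  ∀ fr ∈ S, ∀ x ∈ fr.2.1, x ∈ pvUniv fd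

lemma pvGet?_univ {fd : List (String × List String)} {k : String} {ds : List String}
    (h : (PySem.Dict.mk fd).get? k = some ds) :
    k ∈ pvUniv fd ∧ ∀ x ∈ ds, x ∈ pvUniv fd := by
  induction fd with
  | nil => simp [PySem.Dict.get?] at h
  | cons p t ih =>
    rw [show p :: t = (p.1, p.2) :: t by simp, PySem.Dict.get?_mk_cons] at h
    by_cases hk : p.1 = k
    · simp only [hk, beq_self_eq_true, if_pos, Option.some.injEq] at h
      subst hk
      refine ⟨by simp [pvUniv], fun x hx => ?_⟩
      rw [← h] at hx
      simp only [pvUniv, List.flatMap_cons, List.mem_append, List.mem_cons]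
      exact Or.inl (Or.inr hx)
    · rw [if_neg (by simpa using hk)] at h
      obtain ⟨h1, h2⟩ := ih h
      simp only [pvUniv, List.flatMap_cons, List.mem_append, List.mem_cons] at h1 h2 ⊢
      exact ⟨Or.inr h1, fun x hx => Or.inr (h2 x hx)⟩

lemma pvGetD_univ {fd : List (String × List String)} {k x : String}
    (h : x ∈ (PySem.Dict.mk fd).getD k []) : x ∈ pvUniv fd := by
  rcases hg : (PySem.Dict.mk fd).get? k with _ | ds
  · rw [PySem.Dict.getD_eq_get?_getD, hg] at h; simp at h
  · rw [PySem.Dict.getD_eq_get?_getD, hg] at h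
    exact (pvGet?_univ hg).2 x h

lemma pvGet?_some_of_mem {fd : List (String × List String)} {p : String × List String}
    (h : p ∈ fd) : ∃ ds, (PySem.Dict.mk fd).get? p.1 = some ds := by
  induction fd with
  | nil => simp at h
  | cons q t ih =>
    rw [List.mem_cons] at h
    rw [show q :: t = (q.1, q.2) :: t by simp]
    by_cases hk : q.1 = p.1
    · exact ⟨q.2, by rw [PySem.Dict.get?_mk_cons, if_pos (by simpa using hk)]⟩
    · rcases h with h | h
      · exact absurd (congrArg Prod.fst h).symm hk
      · obtain ⟨ds, hds⟩ := ih h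
        exact ⟨ds, by rw [PySem.Dict.get?_mk_cons, if_neg (by simpa using hk)]; exact hds⟩

lemma pvGetD_of_get?_some {fd : List (String × List String)} {k : String} {ds : List String}
    (h : (PySem.Dict.mk fd).get? k = some ds) : (PySem.Dict.mk fd).getD k [] = ds := by
  simp [PySem.Dict.getD_eq_get?_getD, h]

lemma pvMem_add {v : PySem.Set String} {x y : String} (h : y ∈ v) : y ∈ PySem.Set.add v x := by
  simp [PySem.Set.mem_add, h]

lemma pvFresh_mono {fd : List (String × List String)} {v w : PySem.Set String}
    (h : ∀ y, y ∈ v → y ∈ w) : pvFresh fd w ≤ pvFresh fd v := by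
  refine List.countP_mono_left (fun a _ ha => ?_)
  rcases hcv : PySem.Set.contains v a with _ | _
  · simp
  · exfalso
    simp only [Bool.not_eq_eq_eq_not, Bool.not_true] at ha
    rw [(PySem.Set.contains_iff w a).mpr (h a ((PySem.Set.contains_iff v a).mp hcv))] at ha
    simp at ha

lemma pvCountP_lt {α : Type} {l : List α} {p q : α → Bool} {x : α} (hx : x ∈ l)
    (hpx : p x = true) (hqx : q x = false) (h : ∀ a, q a = true → p a = true) :
    l.countP q < l.countP p := by
  induction l with
  | nil => simp at hx
  | cons a t ih =>
    rw [List.countP_cons, List.countP_cons]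
    rcases List.mem_cons.mp hx with rfl | hx'
    · have hle : t.countP q ≤ t.countP p := List.countP_mono_left (fun a _ => h a)
      simp [hpx, hqx]
      omega
    · have ha : (if q a = true then 1 else 0) ≤ (if p a = true then 1 else 0) := by
        rcases hqa : q a with _ | _
        · simp
        · simp [h a hqa]
      have := ih hx'
      omega

lemma pvFresh_add_lt {fd : List (String × List String)} {v : PySem.Set String} {x : String}
    (hx : x ∈ pvUniv fd) (hv : PySem.Set.contains v x = false) :
    pvFresh fd (PySem.Set.add v x) < pvFresh fd v := by
  refine pvCountP_lt hx ?_ ?_ ?_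
  · simp only [Bool.not_eq_eq_eq_not, Bool.not_true]
    exact hv
  · simp [PySem.Set.mem_add]
  · intro a ha
    rcases hcv : PySem.Set.contains v a with _ | _
    · simp
    · exfalso
      have hm : a ∈ PySem.Set.add v x := pvMem_add ((PySem.Set.contains_iff v a).mp hcv)
      simp only [Bool.not_eq_eq_eq_not, Bool.not_true] at ha
      rw [(PySem.Set.contains_iff _ a).mpr hm] at ha
      simp at ha

lemma pvFresh_le {fd : List (String × List String)} (v : PySem.Set String) :
    pvFresh fd v ≤ (pvUniv fd).length :=
  List.countP_le_length

lemma pvContains_false_of_not_mem {v : PySem.Set String} {x : String} (h : x ∉ v) :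
    PySem.Set.contains v x = false := by
  rcases hc : PySem.Set.contains v x with _ | _
  · rfl
  · exact absurd ((PySem.Set.contains_iff v x).mp hc) h

-- visited only grows through A's dep fold (given that it grows through the call)
lemma pvGrowFoldAux (fd : List (String × List String)) (f : Nat)
    (hA : ∀ x st y, y ∈ st.2 → y ∈ (pvDfsA fd f x st).2.2) :
    ∀ l acc y, y ∈ acc.2.2 → y ∈ (pvDfsAFold fd f l acc).2.2 := by
  intro l
  induction l with
  | nil => intro acc y hy; rw [pvDfsAFold]; exact hy
  | cons d t iht =>
    intro acc y hy
    rw [pvDfsAFold]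
    exact iht _ y (hA d acc.2 y hy)

-- visited only grows through the recursive DFS
lemma pvGrowA (fd : List (String × List String)) :
    ∀ f x st y, y ∈ st.2 → y ∈ (pvDfsA fd f x st).2.2 := by
  intro f
  induction f with
  | zero => intro x st y hy; rw [pvDfsA]; exact hy
  | succ f ih =>
    intro x st y hy
    rw [pvDfsA]
    by_cases hc : x ∈ st.2
    · rw [if_pos ((PySem.Set.contains_iff st.2 x).mpr hc)]; exact hy
    · rw [if_neg (by rw [pvContains_false_of_not_mem hc]; simp)]
      rcases hg : (PySem.Dict.mk fd).get? x with _ | ds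
      · exact pvMem_add hy
      · exact pvGrowFoldAux fd f ih ds _ y (pvMem_add hy)

-- with sufficient gas, the iterative DFS does not depend on the gas
lemma pvStabB (fd : List (String × List String)) :
    ∀ g w g' S st, pvWeight S = w → pvSOK fd S → pvFresh fd st.2 < g → pvFresh fd st.2 < g' →
      pvRunB fd g S st = pvRunB fd g' S st := by
  intro g
  induction g using Nat.strong_induction_on with
  | _ g ihg =>
    intro w
    induction w using Nat.strong_induction_on with
    | _ w ihw =>
      intro g' S st hw hok hg hg'
      match g, g' with
      | a+1, b+1 =>
        match S with
        | [] => rw [pvRunB, pvRunB]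
        | (node, dep :: deps', mx) :: rest =>
          rw [pvRunB, pvRunB]
          by_cases hc : dep ∈ st.2
          · rw [if_pos ((PySem.Set.contains_iff st.2 dep).mpr hc),
               if_pos ((PySem.Set.contains_iff st.2 dep).mpr hc)]
            refine ihw (pvWeight ((node, deps', max mx (PySem.Dict.getD st.1 dep 0 + 1)) :: rest))
              (by simp [← hw, pvWeight]) (b+1) _ st rfl ?_ hg hg'
            intro fr hfr x hx
            rcases List.mem_cons.mp hfr with rfl | hfr'
            · exact hok _ (List.mem_cons_self) x (List.mem_cons_of_mem _ hx)
            · exact hok fr (List.mem_cons_of_mem _ hfr') x hx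
          · rw [if_neg (by rw [pvContains_false_of_not_mem hc]; simp),
               if_neg (by rw [pvContains_false_of_not_mem hc]; simp)]
            have hdep : dep ∈ pvUniv fd := hok _ (List.mem_cons_self) dep (List.mem_cons_self)
            have hlt : pvFresh fd (PySem.Set.add st.2 dep) < pvFresh fd st.2 :=
              pvFresh_add_lt hdep (pvContains_false_of_not_mem hc)
            refine ihg a (by omega) (pvWeight ((dep, (PySem.Dict.mk fd).getD dep [], 0)
              :: (node, deps', mx) :: rest)) b _ _ rfl ?_
              (by show pvFresh fd (PySem.Set.add st.2 dep) < a; omega)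
              (by show pvFresh fd (PySem.Set.add st.2 dep) < b; omega)
            intro fr hfr x hx
            rcases List.mem_cons.mp hfr with rfl | hfr'
            · exact pvGetD_univ hx
            · rcases List.mem_cons.mp hfr' with rfl | hfr''
              · exact hok _ (List.mem_cons_self) x (List.mem_cons_of_mem _ hx)
              · exact hok fr (List.mem_cons_of_mem _ hfr'') x hx
        | (node, [], mx) :: [] => rw [pvRunB, pvRunB]
        | (node, [], mx) :: (pn, pd, pm) :: r =>
          rw [pvRunB, pvRunB]
          refine ihw (pvWeight ((pn, pd, max pm (mx + 1)) :: r))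
            (by simp [← hw, pvWeight]) (b+1) _ _ rfl ?_ hg hg'
          intro fr hfr x hx
          rcases List.mem_cons.mp hfr with rfl | hfr'
          · exact hok _ (List.mem_cons_of_mem _ List.mem_cons_self) x hx
          · exact hok fr (List.mem_cons_of_mem _ (List.mem_cons_of_mem _ hfr')) x hx

-- what the iterative DFS does after the top frame's value r is known
def pvFinish (fd : List (String × List String)) (g : Nat) (node : String)
    (r : Int × PvSt) (rest : List PvFrame) : PvSt :=
  match rest with
  | [] => (PySem.Dict.insert r.2.1 node r.1, r.2.2)
  | (pn, pd, pm) :: t =>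
    pvRunB fd g ((pn, pd, max pm (r.1 + 1)) :: t) (PySem.Dict.insert r.2.1 node r.1, r.2.2)

lemma pvFinish_stab (fd : List (String × List String)) {g g' : Nat} (node : String)
    (r : Int × PvSt) {rest : List PvFrame} (hok : pvSOK fd rest)
    (h1 : pvFresh fd r.2.2 < g) (h2 : pvFresh fd r.2.2 < g') :
    pvFinish fd g node r rest = pvFinish fd g' node r rest := by
  match rest with
  | [] => rfl
  | (pn, pd, pm) :: t =>
    show pvRunB fd g _ _ = pvRunB fd g' _ _
    refine pvStabB fd g _ g' _ _ rfl ?_ h1 h2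
    intro fr hfr x hx
    rcases List.mem_cons.mp hfr with rfl | hfr'
    · exact hok _ (List.mem_cons_self) x hx
    · exact hok fr (List.mem_cons_of_mem _ hfr') x hx

-- the simulation: one stack frame of B computes exactly A's dep fold, then finishes
lemma pvSim (fd : List (String × List String)) :
    ∀ f deps g node mx rest st,
      pvFresh fd st.2 < f → pvFresh fd st.2 < g →
      (∀ x ∈ deps, x ∈ pvUniv fd) → pvSOK fd rest →
      pvRunB fd g ((node, deps, mx) :: rest) st
        = pvFinish fd g node (pvDfsAFold fd f deps (mx, st)) rest := by
  intro f
  induction f using Nat.strong_induction_on with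
  | _ f ihf =>
    intro deps
    induction deps with
    | nil =>
      intro g node mx rest st hf hg hdeps hok
      match g with
      | b+1 =>
        rw [pvDfsAFold]
        match rest with
        | [] => rw [pvRunB]; rfl
        | (pn, pd, pm) :: t => rw [pvRunB]; rfl
    | cons dep deps' ihd =>
      intro g node mx rest st hf hg hdeps hok
      match f, g with
      | f₁+1, b+1 =>
        rw [pvRunB, pvDfsAFold]
        by_cases hc : dep ∈ st.2
        · rw [if_pos ((PySem.Set.contains_iff st.2 dep).mpr hc)]
          have hdfs : pvDfsA fd (f₁+1) dep st = (PySem.Dict.getD st.1 dep 0, st) := by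
            rw [pvDfsA, if_pos ((PySem.Set.contains_iff st.2 dep).mpr hc)]
          rw [hdfs]
          exact ihd (b+1) node (max mx (PySem.Dict.getD st.1 dep 0 + 1)) rest st hf hg
            (fun x hx => hdeps x (List.mem_cons_of_mem _ hx)) hok
        · rw [if_neg (by rw [pvContains_false_of_not_mem hc]; simp)]
          have hdep : dep ∈ pvUniv fd := hdeps dep List.mem_cons_self
          have hcf : PySem.Set.contains st.2 dep = false := pvContains_false_of_not_mem hc
          have hlt : pvFresh fd (PySem.Set.add st.2 dep) < pvFresh fd st.2 :=
            pvFresh_add_lt hdep hcf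
          set st' : PvSt := (st.1, PySem.Set.add st.2 dep) with hst'
          set r : Int × PvSt := pvDfsAFold fd f₁ ((PySem.Dict.mk fd).getD dep []) (0, st') with hr
          have hfr' : pvFresh fd r.2.2 ≤ pvFresh fd (PySem.Set.add st.2 dep) := by
            rw [hr]
            exact pvFresh_mono (fun y hy =>
              pvGrowFoldAux fd f₁ (fun x'' st'' y'' hy'' => pvGrowA fd f₁ x'' st'' y'' hy'') _ _ y hy)
          -- the recursive call of A on dep computes exactly r and the state st₂
          have hdfs : pvDfsA fd (f₁+1) dep st
              = (r.1, (PySem.Dict.insert r.2.1 dep r.1, r.2.2)) := by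
            rw [pvDfsA, if_neg (by rw [hcf]; simp)]
            rcases hgd : (PySem.Dict.mk fd).get? dep with _ | ds
            · have hge : (PySem.Dict.mk fd).getD dep [] = [] := by
                rw [PySem.Dict.getD_eq_get?_getD, hgd]
                rfl
              simp only [hr, hge, hst']
              rw [pvDfsAFold]
            · have hge : (PySem.Dict.mk fd).getD dep [] = ds := pvGetD_of_get?_some hgd
              simp only [hr, hge, hst']
          -- run the pushed frame to completion via the outer induction hypothesis
          rw [ihf f₁ (by omega) ((PySem.Dict.mk fd).getD dep []) b dep 0
            ((node, deps', mx) :: rest) st'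
            (by show pvFresh fd (PySem.Set.add st.2 dep) < f₁; omega)
            (by show pvFresh fd (PySem.Set.add st.2 dep) < b; omega)
            (fun x hx => pvGetD_univ hx)
            (by
              intro fr hfr x hx
              rcases List.mem_cons.mp hfr with rfl | hfr'
              · exact hdeps x (List.mem_cons_of_mem _ hx)
              · exact hok fr hfr' x hx)]
          show pvRunB fd b ((node, deps', max mx (r.1 + 1)) :: rest)
              (PySem.Dict.insert r.2.1 dep r.1, r.2.2) = _
          rw [hdfs]
          -- resume the parent frame via the inner induction hypothesis, then align the gas
          rw [ihd b node (max mx (r.1 + 1)) rest (PySem.Dict.insert r.2.1 dep r.1, r.2.2)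
            (by show pvFresh fd r.2.2 < f₁+1; omega)
            (by show pvFresh fd r.2.2 < b; omega)
            (fun x hx => hdeps x (List.mem_cons_of_mem _ hx)) hok]
          refine pvFinish_stab fd node _ hok ?_ ?_
          all_goals
            refine lt_of_le_of_lt (pvFresh_mono (fun y hy =>
              pvGrowFoldAux fd (f₁+1) (fun x'' st'' y'' hy'' => pvGrowA fd (f₁+1) x'' st'' y'' hy'') _ _ y hy)) ?_
          · show pvFresh fd r.2.2 < b; omega
          · show pvFresh fd r.2.2 < b+1; omega

lemma pvDrive_eq (fd : List (String × List String)) :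
    ∀ l st, (∀ p ∈ l, p ∈ fd) →
      pvDriveA fd (pvGas fd) l st = pvDriveB fd (pvGas fd) l st := by
  intro l
  induction l with
  | nil => intro st h; rw [pvDriveA, pvDriveB]
  | cons p t ih =>
    intro st h
    rw [pvDriveA, pvDriveB]
    by_cases hc : p.1 ∈ st.2
    · rw [if_pos ((PySem.Set.contains_iff st.2 p.1).mpr hc),
         if_pos ((PySem.Set.contains_iff st.2 p.1).mpr hc)]
      exact ih st (fun q hq => h q (List.mem_cons_of_mem _ hq))
    · rw [if_neg (by rw [pvContains_false_of_not_mem hc]; simp),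
         if_neg (by rw [pvContains_false_of_not_mem hc]; simp)]
      have hst : (pvDfsA fd (pvGas fd) p.1 st).2
          = pvRunB fd (pvGas fd) [(p.1, (PySem.Dict.mk fd).getD p.1 [], 0)]
              (st.1, PySem.Set.add st.2 p.1) := by
        obtain ⟨ds, hds⟩ := pvGet?_some_of_mem (h p List.mem_cons_self)
        have hcf : PySem.Set.contains st.2 p.1 = false := pvContains_false_of_not_mem hc
        have hp1 : p.1 ∈ pvUniv fd := (pvGet?_univ hds).1
        have hlt : pvFresh fd (PySem.Set.add st.2 p.1) < pvFresh fd st.2 :=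
          pvFresh_add_lt hp1 hcf
        have hle : pvFresh fd st.2 ≤ (pvUniv fd).length := pvFresh_le st.2
        have hgas : pvGas fd = (pvUniv fd).length + 1 := rfl
        rw [pvGas] at *
        rw [pvDfsA, if_neg (by rw [hcf]; simp), hds]
        rw [pvSim fd ((pvUniv fd).length) ((PySem.Dict.mk fd).getD p.1 [])
          ((pvUniv fd).length + 1) p.1 0 [] (st.1, PySem.Set.add st.2 p.1)
          (by show pvFresh fd (PySem.Set.add st.2 p.1) < (pvUniv fd).length; omega)
          (by show pvFresh fd (PySem.Set.add st.2 p.1) < (pvUniv fd).length + 1; omega)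
          (fun x hx => pvGetD_univ hx) (by intro fr hfr; simp at hfr)]
        rw [pvGetD_of_get?_some hds]
        rfl
      rw [hst]
      exact ih _ (fun q hq => h q (List.mem_cons_of_mem _ hq))

-- ===== VERDICT (by name: the statement is the Claim_ definition above) =====
theorem calculate_dependency_depth_spec : Claim_equal_calculate_dependency_depth := by
  intro fd _
  unfold Spec_calculate_dependency_depth calculate_dependency_depth calculate_dependency_depth_alt
  rw [pvDrive_eq fd fd _ (fun p hp => hp)]
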